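-- pv_equiv track=rewrite | github.com/twinmewilliam-a11y/shorts-fission-new | backend/app/services/subtitle_extractor.py | _select_best_subtitle_stream
-- ===== SOURCE A (Python) =====
-- from typing import Optional, List, Dict, Tuple
--
-- def _select_best_subtitle_stream(
--
--     streams: List[Dict],
--     prefer_lang: str = None
-- ) -> Optional[Dict]:
--     """
--     选择最佳字幕流
--
--     优先级：
--     1. 指定语言
--     2. 中文
--     3. 英文
--     4. 第一个
--     """
--     if not streams:
--         return None
--
--     lang_priority = ['zh', 'cn', 'chi', 'zho', 'en', 'eng']
--     if prefer_lang:
--         lang_priority.insert(0, prefer_lang.lower())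
--
--     for lang in lang_priority:
--         for stream in streams:
--             stream_lang = (stream.get('language') or '').lower()
--             if lang in stream_lang:
--                 return stream
--
--     # 返回第一个
--     return streams[0]
-- ===== SOURCE B (Python) =====
-- def _select_best_subtitle_stream(streams, prefer_lang=None):
--     if not streams:
--         return None
--     lang_priority = ['zh', 'cn', 'chi', 'zho', 'en', 'eng']
--     if prefer_lang:
--         lang_priority.insert(0, prefer_lang.lower())
--     no_match = len(lang_priority)
--     best, best_rank = None, no_match
--     for stream in streams:
--         stream_lang = (stream.get('language') or '').lower()
--         rank = next((i for i, l in enumerate(lang_priority) if l in stream_lang), no_match)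
--         if rank < best_rank:
--             best, best_rank = stream, rank
--     return best if best is not None else streams[0]
-- ===== Notes on version B (the rewrite author's own statement) =====
-- stated objective: alternative
-- what changed: A scans the whole stream list once per priority language (priority-major nested loops with early return); B makes a single pass over the streams, computing each stream's priority rank and keeping the first stream with the strictly smallest rank, falling back to streams[0] when none matched.
import Mathlib
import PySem

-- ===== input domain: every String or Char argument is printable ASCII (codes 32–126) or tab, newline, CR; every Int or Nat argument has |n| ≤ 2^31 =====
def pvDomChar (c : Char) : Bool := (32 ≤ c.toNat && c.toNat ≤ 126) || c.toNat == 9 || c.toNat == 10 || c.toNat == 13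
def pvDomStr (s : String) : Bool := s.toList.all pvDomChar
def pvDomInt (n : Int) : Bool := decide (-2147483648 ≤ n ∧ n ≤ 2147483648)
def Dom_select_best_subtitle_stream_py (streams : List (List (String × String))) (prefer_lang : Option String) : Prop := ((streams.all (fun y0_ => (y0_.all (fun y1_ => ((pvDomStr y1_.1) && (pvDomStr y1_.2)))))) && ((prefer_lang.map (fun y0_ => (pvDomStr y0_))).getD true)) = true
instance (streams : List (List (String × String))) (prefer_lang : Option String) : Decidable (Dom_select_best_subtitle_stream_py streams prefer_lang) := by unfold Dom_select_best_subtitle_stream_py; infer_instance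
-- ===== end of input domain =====

-- B replaces A's priority-major nested scan by a single pass over the streams
-- tracking the best (smallest) priority rank; alternative decomposition, same cost class.


-- ===== PORT A =====
-- (stream.get('language') or '').lower()
def pvLangA (stream : List (String × String)) : String :=
  PySem.Str.lower (PySem.Dict.getD ⟨stream⟩ "language" "")

-- lang_priority = [...]; if prefer_lang: lang_priority.insert(0, prefer_lang.lower())
def pvPrioA (prefer_lang : Option String) : List String :=
  let base := ["zh", "cn", "chi", "zho", "en", "eng"]
  match prefer_lang with
  | some p => if p = "" then base else PySem.Str.lower p :: base
  | none => base

-- outer loop 'for lang in lang_priority' (the inner 'for stream in streams: … return stream' is find?)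
def pvALoop (streams : List (List (String × String))) : List String → Option (List (String × String))
  | [] => none
  | lang :: rest =>
    match streams.find? (fun stream => PySem.Str.isIn lang (pvLangA stream)) with
    | some stream => some stream
    | none => pvALoop streams rest

def select_best_subtitle_stream_py (streams : List (List (String × String))) (prefer_lang : Option String) : Option (List (String × String)) :=
  match streams with
  | [] => none
  | s0 :: _ =>
    match pvALoop streams (pvPrioA prefer_lang) with
    | some stream => some stream
    | none => some s0   -- return streams[0]

-- ===== PORT B =====
-- lang_priority, built the same way in Source B
def pvPrioB (prefer_lang : Option String) : List String :=
  let base := ["zh", "cn", "chi", "zho", "en", "eng"]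
  match prefer_lang with
  | some p => if p = "" then base else PySem.Str.lower p :: base
  | none => base

-- rank = next((i for i, l in enumerate(lang_priority) if l in stream_lang), no_match)
def pvRankB (prio : List String) (stream : List (String × String)) : Nat :=
  let stream_lang := PySem.Str.lower (PySem.Dict.getD ⟨stream⟩ "language" "")
  (prio.findIdx? (fun l => PySem.Str.isIn l stream_lang)).getD prio.length

def select_best_subtitle_stream_py_alt (streams : List (List (String × String))) (prefer_lang : Option String) : Option (List (String × String)) :=
  match streams with
  | [] => none
  | s0 :: _ =>
    let prio := pvPrioB prefer_lang
    let res := streams.foldl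
      (fun (acc : Option (List (String × String)) × Nat) stream =>
        let r := pvRankB prio stream
        if r < acc.2 then (some stream, r) else acc)
      (none, prio.length)
    match res.1 with
    | some stream => some stream
    | none => some s0

-- ===== PRECONDITION & SPEC =====
def Spec_select_best_subtitle_stream_py (streams : List (List (String × String))) (prefer_lang : Option String) (out : Option (List (String × String))) : Prop := out = select_best_subtitle_stream_py_alt streams prefer_lang
instance (streams : List (List (String × String))) (prefer_lang : Option String) (out : Option (List (String × String))) : Decidable (Spec_select_best_subtitle_stream_py streams prefer_lang out) := by unfold Spec_select_best_subtitle_stream_py; infer_instance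

-- ===== CLAIM (what is proved, stated in full; the proofs are below) =====
def Claim_equal_select_best_subtitle_stream_py : Prop := ∀ (streams : List (List (String × String))) (prefer_lang : Option String), Dom_select_best_subtitle_stream_py streams prefer_lang → Spec_select_best_subtitle_stream_py streams prefer_lang (select_best_subtitle_stream_py streams prefer_lang)

-- ===== LEMMAS AND PROOFS =====

theorem pvPrio_eq (prefer_lang : Option String) : pvPrioB prefer_lang = pvPrioA prefer_lang := by
  cases prefer_lang <;> rfl

-- running minimum of the ranks, seeded with b
def pvM (prio : List String) (streams : List (List (String × String))) (b : Nat) : Nat :=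
  streams.foldl (fun a stream => min a (pvRankB prio stream)) b

theorem pvM_le (prio : List String) (streams : List (List (String × String))) (b : Nat) :
    pvM prio streams b ≤ b := by
  induction streams generalizing b with
  | nil => simp [pvM]
  | cons s t ih => exact le_trans (ih (min b (pvRankB prio s))) (min_le_left _ _)

theorem pvM_le_mem (prio : List String) (streams : List (List (String × String))) (b : Nat)
    (s : List (String × String)) (hs : s ∈ streams) : pvM prio streams b ≤ pvRankB prio s := by
  induction streams generalizing b with
  | nil => cases hs
  | cons x t ih =>
    rcases List.mem_cons.mp hs with rfl | h
    · exact le_trans (pvM_le prio t _) (min_le_right _ _)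
    · exact ih _ h

theorem pvFind?_congr_mem {α : Type} (l : List α) (p q : α → Bool)
    (h : ∀ x ∈ l, p x = q x) : l.find? p = l.find? q := by
  induction l with
  | nil => rfl
  | cons a t ih =>
    rw [List.find?_cons, List.find?_cons, h a (by simp)]
    cases q a
    · exact ih (fun x hx => h x (List.mem_cons_of_mem _ hx))
    · rfl

-- B's fold, characterised by the running minimum
theorem pvFold_spec (prio : List String) (streams : List (List (String × String)))
    (best : Option (List (String × String))) (b : Nat) :
    streams.foldl
      (fun (acc : Option (List (String × String)) × Nat) stream =>
        let r := pvRankB prio stream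
        if r < acc.2 then (some stream, r) else acc)
      (best, b)
    = (if pvM prio streams b < b
         then streams.find? (fun s => decide (pvRankB prio s ≤ pvM prio streams b))
         else best,
       pvM prio streams b) := by
  induction streams generalizing best b with
  | nil => simp [pvM]
  | cons st t ih =>
    simp only [List.foldl_cons]
    by_cases hr : pvRankB prio st < b
    · simp only [if_pos hr]
      rw [ih]
      have hmin : pvM prio (st :: t) b = pvM prio t (pvRankB prio st) := by
        simp only [pvM, List.foldl_cons, min_eq_right (le_of_lt hr)]
      rw [hmin]
      have hMle : pvM prio t (pvRankB prio st) ≤ pvRankB prio st := pvM_le _ _ _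
      have hMb : pvM prio t (pvRankB prio st) < b := lt_of_le_of_lt hMle hr
      rw [if_pos hMb]
      by_cases hM : pvM prio t (pvRankB prio st) < pvRankB prio st
      · rw [if_pos hM, List.find?_cons_of_neg (by simp; omega)]
      · have heq : pvM prio t (pvRankB prio st) = pvRankB prio st :=
          le_antisymm hMle (not_lt.mp hM)
        rw [if_neg hM, List.find?_cons_of_pos (by simp [heq])]
    · simp only [if_neg hr]
      rw [ih]
      have hmin : pvM prio (st :: t) b = pvM prio t b := by
        simp only [pvM, List.foldl_cons, min_eq_left (not_lt.mp hr)]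
      rw [hmin]
      by_cases hM : pvM prio t b < b
      · rw [if_pos hM, if_pos hM, List.find?_cons_of_neg (by simp; omega)]
      · rw [if_neg hM, if_neg hM]

-- first-index-or-length over a cons, for an arbitrary predicate
theorem pvGetD_findIdx?_cons {α : Type} (p : α → Bool) (a : α) (l : List α) :
    (((a :: l).findIdx? p).getD (l.length + 1))
      = if p a then 0 else (l.findIdx? p).getD l.length + 1 := by
  rw [List.findIdx?_cons]
  by_cases h : p a
  · simp [h]
  · cases hfi : l.findIdx? p <;> simp [h]

-- rank with respect to a cons priority list
theorem pvRank_cons (l : String) (rest : List String) (s : List (String × String)) :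
    pvRankB (l :: rest) s
      = if PySem.Str.isIn l (pvLangA s) then 0 else pvRankB rest s + 1 := by
  show (((l :: rest).findIdx? (fun x => PySem.Str.isIn x (pvLangA s))).getD (l :: rest).length) = _
  rw [List.length_cons, pvGetD_findIdx?_cons]
  rfl

-- if every rank shifts by one, so does the running minimum
theorem pvM_shift (prio' prio : List String)
    (streams : List (List (String × String))) (b : Nat)
    (h : ∀ s ∈ streams, pvRankB prio' s = pvRankB prio s + 1) :
    pvM prio' streams (b + 1) = pvM prio streams b + 1 := by
  induction streams generalizing b with
  | nil => simp [pvM]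
  | cons x t ih =>
    simp only [pvM, List.foldl_cons]
    rw [h x (by simp)]
    have hm : min (b + 1) (pvRankB prio x + 1) = min b (pvRankB prio x) + 1 := by omega
    rw [hm]
    exact ih (min b (pvRankB prio x)) (fun s hs => h s (List.mem_cons_of_mem _ hs))

-- A's nested loop, characterised the same way
theorem pvALoop_spec (streams : List (List (String × String))) (prio : List String) :
    pvALoop streams prio
      = if pvM prio streams prio.length < prio.length
          then streams.find? (fun s => decide (pvRankB prio s ≤ pvM prio streams prio.length))
          else none := by
  induction prio with
  | nil =>
    have h0 : pvM [] streams 0 = 0 := le_antisymm (pvM_le _ _ _) (Nat.zero_le _)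
    simp [pvALoop, h0]
  | cons l rest ih =>
    simp only [pvALoop]
    cases hf : streams.find? (fun stream => PySem.Str.isIn l (pvLangA stream)) with
    | some st =>
      have hmem : st ∈ streams := List.mem_of_find?_eq_some hf
      have hmatch : PySem.Str.isIn l (pvLangA st) = true := by
        have h1 := List.find?_some hf; exact h1
      have hrank : pvRankB (l :: rest) st = 0 := by rw [pvRank_cons, if_pos hmatch]
      have hM0 : pvM (l :: rest) streams (l :: rest).length = 0 := by
        have h1 := pvM_le_mem (l :: rest) streams (l :: rest).length st hmem
        omega
      rw [hM0, if_pos (by simp)]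
      have hpred : ∀ s ∈ streams, (decide (pvRankB (l :: rest) s ≤ 0))
          = PySem.Str.isIn l (pvLangA s) := by
        intro s _
        rw [pvRank_cons]
        by_cases h : PySem.Str.isIn l (pvLangA s) = true <;> simp_all
      rw [pvFind?_congr_mem streams _ _ hpred, hf]
    | none =>
      have hnomatch : ∀ s ∈ streams, PySem.Str.isIn l (pvLangA s) = false := by
        intro s hs
        have h1 := List.find?_eq_none.mp hf s hs
        simp only [Bool.not_eq_true] at h1
        exact h1
      have hshift : ∀ s ∈ streams, pvRankB (l :: rest) s = pvRankB rest s + 1 := by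
        intro s hs
        rw [pvRank_cons, if_neg (fun hc => Bool.false_ne_true ((hnomatch s hs) ▸ hc))]
      rw [ih, List.length_cons, pvM_shift (l :: rest) rest streams rest.length hshift]
      by_cases hM : pvM rest streams rest.length < rest.length
      · rw [if_pos hM, if_pos (by omega)]
        apply pvFind?_congr_mem
        intro s hs
        rw [hshift s hs]
        exact decide_eq_decide.mpr (by omega)
      · rw [if_neg hM, if_neg (by omega)]

-- ===== VERDICT (by name: the statement is the Claim_ definition above) =====
theorem select_best_subtitle_stream_py_spec : Claim_equal_select_best_subtitle_stream_py := by
  intro streams prefer_lang _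
  unfold Spec_select_best_subtitle_stream_py
  unfold select_best_subtitle_stream_py select_best_subtitle_stream_py_alt
  cases streams with
  | nil => rfl
  | cons s0 rest =>
    simp only [pvPrio_eq, pvFold_spec, pvALoop_spec]
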